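-- pv_equiv track=rewrite | github.com/Rasbon99/coding-challenges | dp-challenges/cd.py | solveCD
-- ===== SOURCE A (Python) =====
-- def solveCD(tape_size, n, tracks):
--     memo = [[0 for _ in range(tape_size+1)] for _ in range(n+1)]
--     path = [[0 for _ in range(tape_size+1)] for _ in range(n+1)]
--     i = 0
--     x = 0
--
--     def dp(i, x):
--         if i == n:
--             return 0
--
--         if memo[i][x] != 0:
--             return memo[i][x]
--
--         choices = []
--         if x + tracks[i] <= tape_size:
--             take = dp(i+1, x+tracks[i]) + tracks[i]
--             choices.append((take, True))
--
--         skip = dp(i+1, x)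
--         choices.append((skip, False))
--
--         memo[i][x], path[i][x] = max(choices)
--
--         return memo[i][x]
--
--     sum = dp(i, x)
--
--     # Recuperare i brani
--     tracks_chosen = []
--     while i < n:
--         if path[i][x]:
--             tracks_chosen.append(tracks[i])
--             x += tracks[i]
--         i += 1
--
--     return tracks_chosen, sum
-- ===== SOURCE B (Python) =====
-- def solveCD(tape_size, n, tracks):
--     # Bottom-up DP: dp[i][x] = best extra sum using tracks i..n-1 with x already used;
--     # choose[i][x] records whether track i is taken (ties prefer taking, like A's max).
--     dp = [[0] * (tape_size + 1) for _ in range(n + 1)]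
--     choose = [[False] * (tape_size + 1) for _ in range(n + 1)]
--     for i in range(n - 1, -1, -1):
--         t = tracks[i]
--         for x in range(tape_size + 1):
--             best, c = dp[i + 1][x], False
--             if x + t <= tape_size:
--                 take = dp[i + 1][x + t] + t
--                 if take >= best:
--                     best, c = take, True
--             dp[i][x], choose[i][x] = best, c
--     chosen = []
--     i, x = 0, 0
--     while i < n:
--         if choose[i][x]:
--             chosen.append(tracks[i])
--             x += tracks[i]
--         i += 1
--     return chosen, dp[0][0]
-- ===== Notes on version B (the rewrite author's own statement) =====
-- stated objective: alternative
-- what changed: Replaces A's memoized top-down recursion (whose 0-sentinel memo recomputes zero-valued states) by an iterative bottom-up DP table filled row by row from i=n-1 down to 0, keeping the take-on-tie rule and the forward reconstruction.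
-- outside the precondition, e.g. on solveCD(-1, 0, []): A returns ([], 0), B raises IndexError; on solveCD(2, 5, [6, -2, 4, 6, -2]): A returns ([-2, 4], 2), B returns ([], 0); on solveCD(0, 4, [1, 0, -1, -3]): A returns ([0], 0), B raises IndexError
import Mathlib
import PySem

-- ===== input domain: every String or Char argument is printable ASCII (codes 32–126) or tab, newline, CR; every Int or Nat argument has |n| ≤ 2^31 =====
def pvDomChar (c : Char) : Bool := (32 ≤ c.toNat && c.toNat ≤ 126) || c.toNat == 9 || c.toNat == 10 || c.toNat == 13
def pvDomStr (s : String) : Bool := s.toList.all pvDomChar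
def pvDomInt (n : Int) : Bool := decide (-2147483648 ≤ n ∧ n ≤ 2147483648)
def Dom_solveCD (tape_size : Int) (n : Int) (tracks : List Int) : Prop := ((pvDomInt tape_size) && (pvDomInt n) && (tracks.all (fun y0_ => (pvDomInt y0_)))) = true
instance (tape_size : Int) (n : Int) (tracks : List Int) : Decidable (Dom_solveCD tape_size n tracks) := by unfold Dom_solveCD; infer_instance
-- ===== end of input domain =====

-- B replaces A's memoized top-down recursion (with its 0-sentinel recomputation) by an
-- iterative bottom-up DP table built row by row; same take-on-tie rule and reconstruction.


-- ===== PORT A =====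

-- tracks[i]; exact whenever the index is in range (guaranteed under Pre_)
def pvTrk (tracks : List Int) (i : Int) : Int := (PySem.List.pyGet? tracks i).getD 0

-- A's 2D tables memo/path, represented as index functions (initialised to 0 everywhere,
-- matching the 0-filled lists); exact for the in-range accesses A makes under Pre_.
def tblSet (f : Int → Int → Int) (i x v : Int) : Int → Int → Int :=
  fun j y => if j = i ∧ y = x then v else f j y

-- the inner recursive function dp(i, x), threading (memo, path) as state; fuel counts
-- the remaining recursion depth (n - i), always sufficient for the calls A makes.
def dpA (tape_size n : Int) (tracks : List Int) :
    Nat → Int → Int → ((Int → Int → Int) × (Int → Int → Int)) →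
    Int × ((Int → Int → Int) × (Int → Int → Int))
  | 0, _, _, st => (0, st)
  | k+1, i, x, st =>
    if i = n then (0, st)
    else if st.1 i x ≠ 0 then (st.1 i x, st)
    else
      let t := pvTrk tracks i
      if x + t ≤ tape_size then
        let r1 := dpA tape_size n tracks k (i+1) (x+t) st
        let take := r1.1 + t
        let r2 := dpA tape_size n tracks k (i+1) x r1.2
        let skip := r2.1
        -- max([(take, True), (skip, False)]): take wins ties (True > False)
        let best := if skip ≤ take then take else skip
        let c : Int := if skip ≤ take then 1 else 0
        (best, (tblSet r2.2.1 i x best, tblSet r2.2.2 i x c))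
      else
        let r2 := dpA tape_size n tracks k (i+1) x st
        let skip := r2.1
        (skip, (tblSet r2.2.1 i x skip, tblSet r2.2.2 i x 0))

-- the reconstruction while-loop (i < n), fuel = remaining iterations
def reconA (n : Int) (tracks : List Int) (path : Int → Int → Int) :
    Nat → Int → Int → List Int
  | 0, _, _ => []
  | k+1, i, x =>
    if i < n then
      if path i x ≠ 0 then
        pvTrk tracks i :: reconA n tracks path k (i+1) (x + pvTrk tracks i)
      else reconA n tracks path k (i+1) x
    else []

def solveCD (tape_size : Int) (n : Int) (tracks : List Int) : List Int × Int :=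
  let zero : Int → Int → Int := fun _ _ => 0
  let r := dpA tape_size n tracks (n.toNat + 1) 0 0 (zero, zero)
  (reconA n tracks r.2.2 (n.toNat + 1) 0 0, r.1)

-- ===== PORT B =====

-- one row i of the bottom-up tables, computed from the row below (Source B's inner x-loop);
-- each entry is the pair (dp[i][x], choose[i][x])
def rowB (tape_size t : Int) (below : List Int) : List (Int × Bool) :=
  (List.range (tape_size + 1).toNat).map (fun x =>
    let skip := below.getD x 0
    if (x : Int) + t ≤ tape_size then
      let take := below.getD ((x : Int) + t).toNat 0 + t
      if take ≥ skip then (take, true) else (skip, false)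
    else (skip, false))

-- Source B's outer loop `for i in range(n-1, -1, -1)`: after m iterations the state is the
-- current dp row (row n-m) and the choose rows built so far (rows n-m .. n-1, top first)
def buildB (tape_size n : Int) (tracks : List Int) : Nat → List Int × List (List Bool)
  | 0 => (List.replicate (tape_size + 1).toNat 0, [])
  | m+1 =>
    let p := buildB tape_size n tracks m
    let i := n - 1 - m
    let row := rowB tape_size (pvTrk tracks i) p.1
    (row.map Prod.fst, row.map Prod.snd :: p.2)

-- Source B's reconstruction while-loop, walking the choose rows (row i at position i)
def reconB (n : Int) (tracks : List Int) : List (List Bool) → Int → Int → List Int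
  | [], _, _ => []
  | r :: rs, i, x =>
    if i < n then
      if r.getD x.toNat false then
        pvTrk tracks i :: reconB n tracks rs (i+1) (x + pvTrk tracks i)
      else reconB n tracks rs (i+1) x
    else []

def solveCD_alt (tape_size : Int) (n : Int) (tracks : List Int) : List Int × Int :=
  let b := buildB tape_size n tracks n.toNat
  (reconB n tracks b.2 0 0, b.1.getD 0 0)

-- ===== PRECONDITION & SPEC =====

-- Pre_ is the problem's natural domain. Excluded: n < 0 or n > len(tracks) or
-- (tape_size < 0 and n > 0), where A raises IndexError; tape_size < 0 with n = 0, where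
-- A returns ([], 0) but B's dp[0][0] read raises IndexError; and negative track sizes
-- among the first n, where Python's negative-index wraparound into the memo/path tables
-- makes A's returned value (when it does not raise) an accident of its implementation.
def Pre_solveCD (tape_size : Int) (n : Int) (tracks : List Int) : Prop :=
  0 ≤ tape_size ∧ 0 ≤ n ∧ n ≤ tracks.length ∧ ∀ t ∈ tracks.take n.toNat, 0 ≤ t
instance (tape_size : Int) (n : Int) (tracks : List Int) : Decidable (Pre_solveCD tape_size n tracks) := by unfold Pre_solveCD; infer_instance

def pvWitness_solveCD : Int × Int × List Int := (10, 4, [4, 6, 3, 5])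

def Spec_solveCD (tape_size : Int) (n : Int) (tracks : List Int) (out : List Int × Int) : Prop := out = solveCD_alt tape_size n tracks
instance (tape_size : Int) (n : Int) (tracks : List Int) (out : List Int × Int) : Decidable (Spec_solveCD tape_size n tracks out) := by unfold Spec_solveCD; infer_instance

-- ===== CLAIM (what is proved, stated in full; the proofs are below) =====
def Claim_equal_solveCD : Prop := ∀ (tape_size : Int) (n : Int) (tracks : List Int), Dom_solveCD tape_size n tracks → Pre_solveCD tape_size n tracks → Spec_solveCD tape_size n tracks (solveCD tape_size n tracks)

-- ===== LEMMAS AND PROOFS =====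

-- the pure value of dp(i, x): (best sum, take-track-i?), fuel-indexed
def gp (tape_size n : Int) (tracks : List Int) : Nat → Int → Int → Int × Bool
  | 0, _, _ => (0, false)
  | k+1, i, x =>
    if i = n then (0, false)
    else
      let t := pvTrk tracks i
      let skip := (gp tape_size n tracks k (i+1) x).1
      if x + t ≤ tape_size then
        let take := (gp tape_size n tracks k (i+1) (x+t)).1 + t
        if skip ≤ take then (take, true) else (skip, false)
      else (skip, false)

def G (tape_size n : Int) (tracks : List Int) (i x : Int) : Int × Bool :=
  gp tape_size n tracks ((n - i).toNat + 1) i x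

-- the int A's path table stores at a computed state (True → 1, False/untouched-False → 0)
def cI (tape_size n : Int) (tracks : List Int) (i x : Int) : Int :=
  if (G tape_size n tracks i x).2 then 1 else 0

lemma G_stop (tape_size n : Int) (tracks : List Int) (x : Int) :
    G tape_size n tracks n x = (0, false) := by
  simp [G, gp]

lemma G_step (tape_size n : Int) (tracks : List Int) {i : Int} (x : Int) (h : i < n) :
    G tape_size n tracks i x =
      (let t := pvTrk tracks i
       let skip := (G tape_size n tracks (i+1) x).1
       if x + t ≤ tape_size then
         let take := (G tape_size n tracks (i+1) (x+t)).1 + t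
         if skip ≤ take then (take, true) else (skip, false)
       else (skip, false)) := by
  have h1 : (n - i).toNat = (n - (i+1)).toNat + 1 := by omega
  show gp tape_size n tracks ((n - i).toNat + 1) i x = _
  rw [h1]
  simp only [gp, if_neg (by omega : ¬ i = n)]
  rfl

-- the reconstruction chain below (i, x) is recorded correctly in path
def PathOK (tape_size n : Int) (tracks : List Int) (p : Int → Int → Int) :
    Nat → Int → Int → Prop
  | 0, _, _ => True
  | k+1, i, x =>
    i = n ∨ (p i x = cI tape_size n tracks i x ∧
      PathOK tape_size n tracks p k (i+1)
        (x + if (G tape_size n tracks i x).2 then pvTrk tracks i else 0))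

-- writing the correct value anywhere preserves PathOK
lemma PathOK_set (tape_size n : Int) (tracks : List Int) (p : Int → Int → Int)
    (j y : Int) : ∀ (k : Nat) (i x : Int), PathOK tape_size n tracks p k i x →
    PathOK tape_size n tracks (tblSet p j y (cI tape_size n tracks j y)) k i x := by
  intro k
  induction k with
  | zero => intro i x h; exact h
  | succ k ih =>
    intro i x h
    rcases h with h | ⟨h1, h2⟩
    · exact Or.inl h
    · refine Or.inr ⟨?_, ih _ _ h2⟩
      show (if i = j ∧ x = y then cI tape_size n tracks j y else p i x) = _
      split_ifs with hc
      · rw [hc.1, hc.2]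
      · exact h1

-- invariant on A's (memo, path) state
def InvA (tape_size n : Int) (tracks : List Int) (memo p : Int → Int → Int) : Prop :=
  ∀ i x : Int, 0 ≤ i → i < n → 0 ≤ x → x ≤ tape_size →
    memo i x = 0 ∨ (memo i x = (G tape_size n tracks i x).1 ∧
      PathOK tape_size n tracks p ((n - i).toNat + 1) i x)

lemma trk_nonneg (n : Int) (tracks : List Int)
    (hlen : n ≤ tracks.length) (hnn : ∀ t ∈ tracks.take n.toNat, 0 ≤ t)
    {i : Int} (h0 : 0 ≤ i) (h1 : i < n) : 0 ≤ pvTrk tracks i := by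
  have hi : i.toNat < tracks.length := by omega
  have hin : i.toNat < n.toNat := by omega
  have he : pvTrk tracks i = tracks[i.toNat] := by
    simp [pvTrk, PySem.List.pyGet?_of_nonneg tracks h0, List.getElem?_eq_getElem hi]
  rw [he]
  apply hnn
  have hlt : i.toNat < (tracks.take n.toNat).length := by
    simp [List.length_take]; omega
  have : (tracks.take n.toNat)[i.toNat] = tracks[i.toNat] := List.getElem_take
  rw [← this]
  exact List.getElem_mem hlt

-- main correctness of A's memoized dp
lemma dpA_ok (tape_size n : Int) (tracks : List Int)
    (hlen : n ≤ tracks.length)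
    (hnn : ∀ t ∈ tracks.take n.toNat, 0 ≤ t) :
    ∀ (k : Nat) (i x : Int) (memo p : Int → Int → Int),
    0 ≤ i → i ≤ n → 0 ≤ x → x ≤ tape_size → (n - i).toNat < k →
    InvA tape_size n tracks memo p →
    (dpA tape_size n tracks k i x (memo, p)).1 = (G tape_size n tracks i x).1 ∧
    InvA tape_size n tracks (dpA tape_size n tracks k i x (memo, p)).2.1
      (dpA tape_size n tracks k i x (memo, p)).2.2 ∧
    PathOK tape_size n tracks (dpA tape_size n tracks k i x (memo, p)).2.2
      ((n - i).toNat + 1) i x ∧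
    (∀ (K : Nat) (I X : Int), PathOK tape_size n tracks p K I X →
      PathOK tape_size n tracks (dpA tape_size n tracks k i x (memo, p)).2.2 K I X) := by
  intro k
  induction k with
  | zero => intro i x memo p _ _ _ _ hk _; omega
  | succ k ih =>
    intro i x memo p h0 h1 hx0 hx1 hk hInv
    by_cases hin : i = n
    · subst hin
      simp only [dpA, if_true]
      exact ⟨by rw [G_stop], hInv, Or.inl rfl, fun K I X h => h⟩
    · have hilt : i < n := lt_of_le_of_ne h1 hin
      have hfe : (n - i).toNat = (n - (i+1)).toNat + 1 := by omega
      simp only [dpA, if_neg hin]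
      by_cases hm : memo i x ≠ 0
      · rw [if_pos hm]
        rcases hInv i x h0 hilt hx0 hx1 with h | ⟨hv, hp⟩
        · exact absurd h hm
        · exact ⟨hv, hInv, hp, fun K I X h => h⟩
      · rw [if_neg hm]
        have htn : 0 ≤ pvTrk tracks i := trk_nonneg n tracks hlen hnn h0 hilt
        by_cases hfit : x + pvTrk tracks i ≤ tape_size
        · rw [if_pos hfit]
          obtain ⟨v1, I1, P1, M1⟩ :=
            ih (i+1) (x + pvTrk tracks i) memo p (by omega) (by omega) (by omega) hfit
              (by omega) hInv
          obtain ⟨v2, I2, P2, M2⟩ :=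
            ih (i+1) x (dpA tape_size n tracks k (i+1) (x + pvTrk tracks i) (memo, p)).2.1
              (dpA tape_size n tracks k (i+1) (x + pvTrk tracks i) (memo, p)).2.2
              (by omega) (by omega) hx0 hx1 (by omega) I1
          set r1 := dpA tape_size n tracks k (i+1) (x + pvTrk tracks i) (memo, p) with hr1
          set r2 := dpA tape_size n tracks k (i+1) x (r1.2.1, r1.2.2) with hr2
          set skip := r2.1 with hskip
          set take := r1.1 + pvTrk tracks i with htake
          have hGix : G tape_size n tracks i x =
              (if skip ≤ take then (take, true) else (skip, false)) := by
            rw [G_step tape_size n tracks x hilt]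
            simp only [if_pos hfit]
            rw [← v1, ← v2, ← htake]
          have hc : cI tape_size n tracks i x = (if skip ≤ take then (1:Int) else 0) := by
            unfold cI; rw [hGix]; split_ifs <;> simp_all
          have hP1' : PathOK tape_size n tracks r2.2.2 ((n - (i+1)).toNat + 1)
              (i+1) (x + pvTrk tracks i) := M2 _ _ _ P1
          have hPix : PathOK tape_size n tracks
              (tblSet r2.2.2 i x (if skip ≤ take then (1:Int) else 0))
              ((n - i).toNat + 1) i x := by
            refine Or.inr ⟨?_, ?_⟩
            · show (if i = i ∧ x = x then _ else _) = _
              rw [if_pos ⟨rfl, rfl⟩, hc]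
            · have hnext : PathOK tape_size n tracks r2.2.2 ((n - i).toNat) (i+1)
                  (x + if (G tape_size n tracks i x).2 then pvTrk tracks i else 0) := by
                rw [hGix, hfe]
                by_cases hle : skip ≤ take
                · simp only [if_pos hle]
                  simpa using hP1'
                · simp only [if_neg hle]
                  simpa using P2
              have hw := PathOK_set tape_size n tracks r2.2.2 i x _ _ _ hnext
              rw [hc] at hw
              exact hw
          refine ⟨?_, ?_, ?_, ?_⟩
          · show (if skip ≤ take then take else skip) = _
            rw [hGix]; split_ifs <;> rfl
          · intro j y hj0 hj1 hy0 hy1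
            simp only []
            by_cases hjy : j = i ∧ y = x
            · obtain ⟨hj, hy⟩ := hjy; subst hj; subst hy
              refine Or.inr ⟨?_, ?_⟩
              · show (if j = j ∧ y = y then (if skip ≤ take then take else skip) else _) = _
                rw [if_pos ⟨rfl, rfl⟩, hGix]; split_ifs <;> rfl
              · exact hPix
            · have hne : (tblSet r2.2.1 i x (if skip ≤ take then take else skip)) j y
                  = r2.2.1 j y := by
                show (if j = i ∧ y = x then _ else _) = _
                rw [if_neg hjy]
              rw [hne]
              rcases I2 j y hj0 hj1 hy0 hy1 with h | ⟨hv, hp⟩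
              · exact Or.inl h
              · refine Or.inr ⟨hv, ?_⟩
                have hw := PathOK_set tape_size n tracks r2.2.2 i x _ _ _ hp
                rw [hc] at hw
                exact hw
          · exact hPix
          · intro K I X h
            simp only []
            have hw := PathOK_set tape_size n tracks r2.2.2 i x _ _ _ (M2 _ _ _ (M1 _ _ _ h))
            rw [hc] at hw
            exact hw
        · rw [if_neg hfit]
          obtain ⟨v2, I2, P2, M2⟩ :=
            ih (i+1) x memo p (by omega) (by omega) hx0 hx1 (by omega) hInv
          set r2 := dpA tape_size n tracks k (i+1) x (memo, p) with hr2
          set skip := r2.1 with hskip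
          have hGix : G tape_size n tracks i x = (skip, false) := by
            rw [G_step tape_size n tracks x hilt]
            simp only [if_neg hfit]
            rw [← v2]
          have hc : cI tape_size n tracks i x = (0:Int) := by
            unfold cI; rw [hGix]; simp
          have hPix : PathOK tape_size n tracks (tblSet r2.2.2 i x 0)
              ((n - i).toNat + 1) i x := by
            refine Or.inr ⟨?_, ?_⟩
            · show (if i = i ∧ x = x then _ else _) = _
              rw [if_pos ⟨rfl, rfl⟩, hc]
            · have hnext : PathOK tape_size n tracks r2.2.2 ((n - i).toNat) (i+1)
                  (x + if (G tape_size n tracks i x).2 then pvTrk tracks i else 0) := by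
                rw [hGix, hfe]; simpa using P2
              have hw := PathOK_set tape_size n tracks r2.2.2 i x _ _ _ hnext
              rw [hc] at hw
              exact hw
          refine ⟨?_, ?_, ?_, ?_⟩
          · show skip = _
            rw [hGix]
          · intro j y hj0 hj1 hy0 hy1
            simp only []
            by_cases hjy : j = i ∧ y = x
            · obtain ⟨hj, hy⟩ := hjy; subst hj; subst hy
              refine Or.inr ⟨?_, hPix⟩
              show (if j = j ∧ y = y then skip else _) = _
              rw [if_pos ⟨rfl, rfl⟩, hGix]
            · have hne : (tblSet r2.2.1 i x skip) j y = r2.2.1 j y := by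
                show (if j = i ∧ y = x then _ else _) = _
                rw [if_neg hjy]
              rw [hne]
              rcases I2 j y hj0 hj1 hy0 hy1 with h | ⟨hv, hp⟩
              · exact Or.inl h
              · refine Or.inr ⟨hv, ?_⟩
                have hw := PathOK_set tape_size n tracks r2.2.2 i x _ _ _ hp
                rw [hc] at hw
                exact hw
          · exact hPix
          · intro K I X h
            simp only []
            have hw := PathOK_set tape_size n tracks r2.2.2 i x _ _ _ (M2 _ _ _ h)
            rw [hc] at hw
            exact hw

-- pure reconstruction over G
def reconG (tape_size n : Int) (tracks : List Int) : Nat → Int → Int → List Int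
  | 0, _, _ => []
  | k+1, i, x =>
    if i < n then
      if (G tape_size n tracks i x).2 then
        pvTrk tracks i :: reconG tape_size n tracks k (i+1) (x + pvTrk tracks i)
      else reconG tape_size n tracks k (i+1) x
    else []

lemma reconG_fuel (tape_size n : Int) (tracks : List Int) :
    ∀ (k k' : Nat) (i x : Int), (n - i).toNat ≤ k → (n - i).toNat ≤ k' →
    reconG tape_size n tracks k i x = reconG tape_size n tracks k' i x := by
  intro k
  induction k with
  | zero =>
    intro k' i x h h'
    cases k' with
    | zero => rfl
    | succ k' => simp only [reconG]; rw [if_neg (by omega)]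
  | succ k ih =>
    intro k' i x h h'
    cases k' with
    | zero => simp only [reconG]; rw [if_neg (by omega)]
    | succ k' =>
      simp only [reconG]
      by_cases hi : i < n
      · rw [if_pos hi, if_pos hi]
        by_cases hg : (G tape_size n tracks i x).2
        · rw [if_pos hg, if_pos hg]
          exact congrArg _ (ih k' (i+1) _ (by omega) (by omega))
        · rw [if_neg hg, if_neg hg]
          exact ih k' (i+1) _ (by omega) (by omega)
      · rw [if_neg hi, if_neg hi]

lemma reconA_eq (tape_size n : Int) (tracks : List Int) (p : Int → Int → Int) :
    ∀ (k : Nat) (i x : Int), PathOK tape_size n tracks p k i x →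
    reconA n tracks p k i x = reconG tape_size n tracks k i x := by
  intro k
  induction k with
  | zero => intro i x _; rfl
  | succ k ih =>
    intro i x h
    simp only [reconA, reconG]
    by_cases hi : i < n
    · rw [if_pos hi, if_pos hi]
      rcases h with h | ⟨h1, h2⟩
      · omega
      · rw [h1]
        unfold cI
        by_cases hg : (G tape_size n tracks i x).2
        · simp only [hg, if_true] at h2 ⊢
          rw [if_pos (show (1:Int) ≠ 0 by norm_num)]
          exact congrArg _ (ih _ _ h2)
        · simp only [Bool.not_eq_true] at hg
          simp only [hg, if_false, Bool.false_eq_true, add_zero] at h2 ⊢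
          rw [if_neg (show ¬ (0:Int) ≠ 0 by simp)]
          exact ih _ _ h2
    · rw [if_neg hi, if_neg hi]

-- B side: the rows built bottom-up are exactly G
lemma buildB_ok (tape_size n : Int) (tracks : List Int)
    (hts : 0 ≤ tape_size) (hlen : n ≤ tracks.length)
    (hnn : ∀ t ∈ tracks.take n.toNat, 0 ≤ t) :
    ∀ (m : Nat), (m : Int) ≤ n →
    (buildB tape_size n tracks m).1 =
      (List.range (tape_size + 1).toNat).map
        (fun (x : Nat) => (G tape_size n tracks (n - m) (x : Int)).1) ∧
    (buildB tape_size n tracks m).2 =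
      (List.range m).map (fun (l : Nat) =>
        (List.range (tape_size + 1).toNat).map
          (fun (x : Nat) => (G tape_size n tracks (n - m + l) (x : Int)).2)) := by
  intro m
  induction m with
  | zero =>
    intro _
    constructor
    · show List.replicate (tape_size + 1).toNat 0 = _
      have : ∀ x : Nat, (G tape_size n tracks (n - ((0:Nat):Int)) (x : Int)).1 = 0 := by
        intro x
        norm_num [G_stop]
      simp only [this, List.map_const', List.length_range]
    · rfl
  | succ m ih =>
    intro hm
    have hmn : (m : Int) ≤ n := by push_cast at hm ⊢; omega
    obtain ⟨ih1, ih2⟩ := ih hmn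
    have hidx : n - 1 - (m : Int) = n - ((m:Int) + 1) := by ring
    have hi0 : (0:Int) ≤ n - ((m:Int) + 1) := by push_cast at hm; omega
    have hilt : n - ((m:Int) + 1) < n := by omega
    have htn : 0 ≤ pvTrk tracks (n - ((m:Int) + 1)) :=
      trk_nonneg n tracks hlen hnn hi0 hilt
    have hrow : rowB tape_size (pvTrk tracks (n - ((m:Int) + 1)))
        (buildB tape_size n tracks m).1 =
        (List.range (tape_size + 1).toNat).map
          (fun (x : Nat) => G tape_size n tracks (n - ((m:Int) + 1)) (x : Int)) := by
      unfold rowB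
      rw [ih1]
      apply List.map_congr_left
      intro a ha
      have haW : a < (tape_size + 1).toNat := List.mem_range.mp ha
      have hax : (0:Int) ≤ (a:Int) := by positivity
      have haT : (a:Int) ≤ tape_size := by omega
      have hskipv : ((List.range (tape_size + 1).toNat).map
          (fun (x : Nat) => (G tape_size n tracks (n - (m:Int)) (x : Int)).1)).getD a 0 =
          (G tape_size n tracks (n - (m:Int)) (a : Int)).1 :=
        PySem.List.getD_map_range _ _ _ _ haW
      rw [hskipv]
      rw [G_step tape_size n tracks (a:Int) hilt]
      have hsucc : n - ((m:Int) + 1) + 1 = n - (m:Int) := by ring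
      rw [hsucc]
      set t := pvTrk tracks (n - ((m:Int) + 1)) with ht
      by_cases hfit : (a:Int) + t ≤ tape_size
      · have htidx : ((a:Int) + t).toNat < (tape_size + 1).toNat := by omega
        have htcast : ((((a:Int) + t).toNat : Nat) : Int) = (a:Int) + t := by omega
        have htakev : ((List.range (tape_size + 1).toNat).map
            (fun (x : Nat) => (G tape_size n tracks (n - (m:Int)) (x : Int)).1)).getD
              ((a:Int) + t).toNat 0 =
            (G tape_size n tracks (n - (m:Int)) ((a:Int) + t)).1 := by
          rw [PySem.List.getD_map_range _ _ _ _ htidx, htcast]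
        simp only [if_pos hfit, htakev, ge_iff_le]
      · simp only [if_neg hfit]
    constructor
    · show (rowB tape_size (pvTrk tracks (n - 1 - (m:Int)))
          (buildB tape_size n tracks m).1).map Prod.fst = _
      rw [hidx]
      rw [hrow, List.map_map]
      have : n - ((m+1:Nat):Int) = n - ((m:Int)+1) := by push_cast; ring
      rw [this]
      rfl
    · show (rowB tape_size (pvTrk tracks (n - 1 - (m:Int)))
          (buildB tape_size n tracks m).1).map Prod.snd :: (buildB tape_size n tracks m).2 = _
      rw [hidx, ih2, List.range_succ_eq_map, List.map_cons]
      congr 1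
      · rw [hrow, List.map_map]
        have : n - ((m+1:Nat):Int) + ((0:Nat):Int) = n - ((m:Int)+1) := by push_cast; ring
        rw [this]
        rfl
      · rw [List.map_map]
        apply List.map_congr_left
        intro l _
        have hind : n - ((m+1:Nat):Int) + ((l.succ : Nat):Int) = n - ((m:Int)) + (l:Int) := by
          push_cast; ring
        simp only [Function.comp, hind]

lemma reconB_eq (tape_size n : Int) (tracks : List Int)
    (hts : 0 ≤ tape_size) (hlen : n ≤ tracks.length)
    (hnn : ∀ t ∈ tracks.take n.toNat, 0 ≤ t) :
    ∀ (m : Nat) (i x : Int), i = n - m → 0 ≤ i → 0 ≤ x → x ≤ tape_size →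
    reconB n tracks
      ((List.range m).map (fun (l : Nat) =>
        (List.range (tape_size + 1).toNat).map
          (fun (y : Nat) => (G tape_size n tracks (i + l) (y : Int)).2))) i x =
    reconG tape_size n tracks m i x := by
  intro m
  induction m with
  | zero => intro i x _ _ _ _; rfl
  | succ m ih =>
    intro i x him hi0 hx0 hx1
    have hilt : i < n := by push_cast at him; omega
    have htn : 0 ≤ pvTrk tracks i := trk_nonneg n tracks hlen hnn hi0 hilt
    rw [List.range_succ_eq_map, List.map_cons, List.map_map]
    show (if i < n then _ else []) = _
    rw [if_pos hilt]
    have hxW : x.toNat < (tape_size + 1).toNat := by omega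
    have hxc : ((x.toNat : Nat) : Int) = x := by omega
    have hget : ((List.range (tape_size + 1).toNat).map
        (fun (y : Nat) => (G tape_size n tracks (i + ((0:Nat):Int)) (y : Int)).2)).getD
          x.toNat false = (G tape_size n tracks i x).2 := by
      rw [PySem.List.getD_map_range _ _ _ _ hxW, hxc]
      norm_num
    have hrest : (List.range m).map
        ((fun (l : Nat) => (List.range (tape_size + 1).toNat).map
          (fun (y : Nat) => (G tape_size n tracks (i + (l : Int)) (y : Int)).2)) ∘ Nat.succ) =
        (List.range m).map (fun (l : Nat) => (List.range (tape_size + 1).toNat).map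
          (fun (y : Nat) => (G tape_size n tracks ((i + 1) + (l : Int)) (y : Int)).2)) := by
      apply List.map_congr_left
      intro l _
      have : i + ((l.succ : Nat) : Int) = (i + 1) + (l : Int) := by push_cast; ring
      simp only [Function.comp, this]
    rw [hget, hrest]
    show _ = (if i < n then _ else [])
    rw [if_pos hilt]
    by_cases hg : (G tape_size n tracks i x).2
    · rw [if_pos hg, if_pos hg]
      have hfit : x + pvTrk tracks i ≤ tape_size := by
        by_contra hcon
        rw [G_step tape_size n tracks x hilt] at hg
        simp only [if_neg hcon] at hg
        exact absurd hg (by simp)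
      exact congrArg _ (ih (i+1) (x + pvTrk tracks i) (by omega)
        (by omega) (by omega) hfit)
    · rw [if_neg hg, if_neg hg]
      exact ih (i+1) x (by omega) (by omega) hx0 hx1

-- ===== VERDICT (by name: the statement is the Claim_ definition above) =====
theorem solveCD_spec : Claim_equal_solveCD := by
  intro tape_size n tracks _ hpre
  obtain ⟨hts, hn, hlen, hnn⟩ := hpre
  show solveCD tape_size n tracks = solveCD_alt tape_size n tracks
  have hzero : InvA tape_size n tracks (fun _ _ => (0:Int)) (fun _ _ => (0:Int)) :=
    fun _ _ _ _ _ _ => Or.inl rfl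
  obtain ⟨hv, _, hP, _⟩ := dpA_ok tape_size n tracks hlen hnn (n.toNat+1) 0 0
      (fun _ _ => 0) (fun _ _ => 0) le_rfl hn le_rfl hts (by omega) hzero
  have hfuel : ((n:Int) - 0).toNat = n.toNat := by omega
  rw [hfuel] at hP
  have hWpos : 0 < (tape_size + 1).toNat := by omega
  obtain ⟨hb1, hb2⟩ := buildB_ok tape_size n tracks hts hlen hnn n.toNat (by omega)
  have hnn0 : n - (n.toNat : Int) = 0 := by omega
  rw [hnn0] at hb1 hb2
  unfold solveCD solveCD_alt
  refine Prod.ext ?_ ?_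
  · show reconA n tracks _ (n.toNat+1) 0 0 = reconB n tracks _ 0 0
    rw [reconA_eq tape_size n tracks _ (n.toNat+1) 0 0 hP]
    rw [hb2]
    rw [reconB_eq tape_size n tracks hts hlen hnn n.toNat 0 0 (by omega) le_rfl le_rfl hts]
    exact reconG_fuel tape_size n tracks (n.toNat+1) n.toNat 0 0 (by omega) (by omega)
  · show (dpA tape_size n tracks (n.toNat+1) 0 0 (_, _)).1 = _
    rw [hv]
    show _ = (buildB tape_size n tracks n.toNat).1.getD 0 0
    rw [hb1, PySem.List.getD_map_range _ _ _ _ hWpos]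
    norm_num
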